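-- pv_equiv track=rewrite | github.com/jeremyimmanuel/leetcode-sols | 1664-Ways-to-Make-a-Fair-Array/solution.py | isFair
-- ===== SOURCE A (Python) =====
-- from typing import List
--
-- def isFair(nums: List[int]) -> bool:
--     even, odd = 0, 0
--     for i in range(len(nums)):
--         if i % 2 == 0:
--             even += nums[i]
--         else:
--             odd += nums[i]
--     return odd == even
-- ===== SOURCE B (Python) =====
-- def isFair(nums):
--     return 2 * sum(nums[::2]) == sum(nums)
-- ===== Notes on version B (the rewrite author's own statement) =====
-- stated objective: simpler
-- what changed: B drops A's index loop with a parity branch and two accumulators entirely: it takes the even-stride slice nums[::2], sums it and the whole list with builtin sum, and compares via the identity even-sum == odd-sum iff 2*even-sum == total.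
import Mathlib
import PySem

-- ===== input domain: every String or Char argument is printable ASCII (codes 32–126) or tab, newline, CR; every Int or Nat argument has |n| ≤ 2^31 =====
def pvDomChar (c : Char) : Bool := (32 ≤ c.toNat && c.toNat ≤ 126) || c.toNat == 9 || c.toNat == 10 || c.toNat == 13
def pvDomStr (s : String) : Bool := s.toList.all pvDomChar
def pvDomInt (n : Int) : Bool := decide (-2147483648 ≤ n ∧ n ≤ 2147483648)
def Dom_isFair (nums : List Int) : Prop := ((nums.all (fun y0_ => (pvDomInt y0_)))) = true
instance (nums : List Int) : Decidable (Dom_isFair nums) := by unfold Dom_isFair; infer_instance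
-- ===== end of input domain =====

-- B replaces A's index loop (parity branch, two accumulators) by two whole-list builtin sums — of the even-stride slice and of the list — compared via 2*even == total (simpler decomposition).

-- ===== PORT A =====
def isFair (nums : List Int) : Bool :=
  let p := (PySem.List.pyRange 0 (PySem.List.len nums) 1).foldl
    (fun (s : Int × Int) i =>
      if PySem.Int.mod i 2 == 0 then (s.1 + PySem.List.pyGetD nums i 0, s.2)
      else (s.1, s.2 + PySem.List.pyGetD nums i 0)) (0, 0)
  p.2 == p.1

-- ===== PORT B =====
def isFair_alt (nums : List Int) : Bool :=
  2 * ((PySem.List.slice? nums none none 2).getD []).sum == nums.sum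

-- ===== PRECONDITION & SPEC =====
def Spec_isFair (nums : List Int) (out : Bool) : Prop := out = isFair_alt nums
instance (nums : List Int) (out : Bool) : Decidable (Spec_isFair nums out) := by unfold Spec_isFair; infer_instance

-- ===== CLAIM (what is proved, stated in full; the proofs are below) =====
def Claim_equal_isFair : Prop := ∀ (nums : List Int), Dom_isFair nums → Spec_isFair nums (isFair nums)

-- ===== LEMMAS AND PROOFS =====

-- even-index and odd-index sublists
def pvEvens : List Int → List Int
  | [] => []
  | [a] => [a]
  | a :: _ :: t => a :: pvEvens t

def pvOdds : List Int → List Int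
  | [] => []
  | _ :: t => pvEvens t

lemma pvEvens_cons (a : Int) (t : List Int) : pvEvens (a :: t) = a :: pvOdds t := by
  cases t <;> simp [pvEvens, pvOdds]

lemma pvOdds_cons (a : Int) (t : List Int) : pvOdds (a :: t) = pvEvens t := rfl

-- the even-stride slice is pvEvens
lemma pvFilterMap_evens (xs : List Int) :
    List.filterMap (fun k => xs[2 * k]?) (List.range ((xs.length + 1) / 2)) = pvEvens xs := by
  induction xs using pvEvens.induct with
  | case1 => simp [pvEvens]
  | case2 a => simp [pvEvens]
  | case3 a b t ih =>
    have hlen : ((a :: b :: t).length + 1) / 2 = (t.length + 1) / 2 + 1 := by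
      simp only [List.length_cons]; omega
    rw [hlen, List.range_succ_eq_map, List.filterMap_cons, List.filterMap_map]
    have hf : ∀ k : Nat, (a :: b :: t)[2 * (k + 1)]? = t[2 * k]? := by
      intro k
      have h2 : 2 * (k + 1) = (2 * k) + 1 + 1 := by omega
      rw [h2]
      simp
    simp only [Function.comp_def, hf, ih, pvEvens]
    simp

lemma pvSlice2 (xs : List Int) :
    PySem.List.slice? xs none none 2 = some (pvEvens xs) := by
  unfold PySem.List.slice? PySem.List.sliceIndices
  norm_num
  have hc : (if 0 < xs.length then (((xs.length : Int) + 2 - 1) / 2).toNat else 0) = (xs.length + 1) / 2 := by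
    split <;> omega
  have hx : ∀ x : Nat, (2 * (x : Int)).toNat = 2 * x := by intro x; omega
  simp only [hc, hx, pvFilterMap_evens]

lemma pvSum_split (xs : List Int) : (pvEvens xs).sum + (pvOdds xs).sum = xs.sum := by
  induction xs with
  | nil => simp [pvEvens, pvOdds]
  | cons a t ih =>
    rw [pvEvens_cons, pvOdds_cons]
    simp only [List.sum_cons]
    have h2 : (pvOdds t).sum + (pvEvens t).sum = t.sum := by omega
    omega

-- parity flip of A's branch condition
lemma pvMod_succ (s : Int) :
    (PySem.Int.mod (s + 1) 2 == 0) = !(PySem.Int.mod s 2 == 0) := by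
  simp only [PySem.Int.mod, Int.fmod_eq_emod]
  rcases Int.emod_two_eq_zero_or_one s with h | h <;>
    rcases Int.emod_two_eq_zero_or_one (s + 1) with h' | h' <;> simp [h, h'] <;> omega

-- A's per-index step, seen as a function of the (index, value) pair
def pvStepA (s : Int × Int) (p : Int × Int) : Int × Int :=
  if PySem.Int.mod p.1 2 == 0 then (s.1 + p.2, s.2) else (s.1, s.2 + p.2)

lemma pvFoldA_char (xs : List Int) : ∀ (s e o : Int),
    (PySem.List.enumerate xs s).foldl pvStepA (e, o) =
      if PySem.Int.mod s 2 == 0 then (e + (pvEvens xs).sum, o + (pvOdds xs).sum)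
      else (e + (pvOdds xs).sum, o + (pvEvens xs).sum) := by
  induction xs with
  | nil => intro s e o; simp [PySem.List.enumerate_nil, pvEvens, pvOdds]
  | cons a t ih =>
    intro s e o
    rw [PySem.List.enumerate_cons, List.foldl_cons, pvEvens_cons, pvOdds_cons]
    by_cases h : PySem.Int.mod s 2 == 0
    · have hstep : pvStepA (e, o) (s, a) = (e + a, o) := by unfold pvStepA; rw [if_pos h]
      rw [hstep, ih (s + 1), pvMod_succ, h]
      simp only [Bool.not_true, Bool.false_eq_true, List.sum_cons]
      refine Prod.ext ?_ ?_ <;> simp <;> ring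
    · have hstep : pvStepA (e, o) (s, a) = (e, o + a) := by unfold pvStepA; rw [if_neg h]
      rw [hstep, ih (s + 1), pvMod_succ]
      simp only [h, Bool.not_false, if_pos, List.sum_cons]
      refine Prod.ext ?_ ?_ <;> simp <;> ring

lemma pvFoldA_eq (nums : List Int) :
    (PySem.List.pyRange 0 (PySem.List.len nums) 1).foldl
      (fun (s : Int × Int) i =>
        if PySem.Int.mod i 2 == 0 then (s.1 + PySem.List.pyGetD nums i 0, s.2)
        else (s.1, s.2 + PySem.List.pyGetD nums i 0)) (0, 0) =
    (PySem.List.enumerate nums 0).foldl pvStepA (0, 0) := by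
  rw [PySem.List.enumerate_eq_map_pyRange (d := 0), List.foldl_map]
  rfl

-- ===== VERDICT (by name: the statement is the Claim_ definition above) =====
theorem isFair_spec : Claim_equal_isFair := by
  intro nums _
  unfold Spec_isFair isFair isFair_alt
  rw [pvSlice2]
  simp only [pvFoldA_eq, Option.getD_some]
  rw [pvFoldA_char nums 0 0 0]
  have h0 : (PySem.Int.mod 0 2 == 0) = true := by decide
  rw [h0]
  simp only [if_pos, zero_add]
  have hs := pvSum_split nums
  by_cases heq : (pvOdds nums).sum = (pvEvens nums).sum
  · have h2 : 2 * (pvEvens nums).sum = nums.sum := by omega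
    simp [heq, h2]
  · have h2 : ¬ (2 * (pvEvens nums).sum = nums.sum) := by omega
    simp [heq, h2]
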